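-- pv_equiv track=rewrite | github.com/john-bn/DAG_ModelComparison | run_comparator.py | normalize_model_key
-- ===== SOURCE A (Python) =====
-- MODEL_REGISTRY = {
--     "hrrr": {
--         "aliases": ["hrrr"],
--         "kwargs": {"model": "hrrr", "product": "sfc"},
--     },
--     "nam5k": {
--         "aliases": ["nam5k", "nam-conusnest", "namnest", "nam hi-res nest"],
--         "kwargs": {"model": "nam", "product": "conusnest.hiresf"},
--     },
--     "nam12k": {
--         "aliases": ["nam12k", "nam-12km", "nam"],
--         "kwargs": {"model": "nam", "product": "awip12"},
--     },
--     "nbm": {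
--         "aliases": ["nbm"],
--         "kwargs": {"model": "nbm", "product": "co"},
--     },
--     "rap": {
--         "aliases": ["rap"],
--         "kwargs": {"model": "rap", "product": "awp130pgrb"},
--     },
--     "arw": {
--         "aliases": ["arw", "ncar-arw"],
--         "kwargs": {"model": "hiresw", "product": "arw_5km", "domain": "conus", "member": 2},
--     },
--     "fv3": {
--         "aliases": ["fv3"],
--         "kwargs": {"model": "hiresw", "product": "fv3_5km", "domain": "conus", "member": 1},
--     },
--     "href": {
--         "aliases": ["href"],
--         "kwargs": {"model": "href", "product": "mean", "domain": "conus"},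
--     },
--     "gfs": {
--         "aliases": ["gfs"],
--         "kwargs": {"model": "gfs", "product": "pgrb2.0p25"},
--     },
--     "rtma": {
--         "aliases": ["rtma"],
--         "kwargs": {"model": "rtma", "product": "anl"},
--     },
-- }
--
-- def normalize_model_key(user_text: str) -> str:
--         """Map user input to our registry key."""
--         key = user_text.strip().lower()
--         # Direct hit
--         if key in MODEL_REGISTRY:
--             return key
--         # Alias hit
--         for reg_key, entry in MODEL_REGISTRY.items():
--             if key in entry.get("aliases", []):
--                 return reg_key
--         raise ValueError(f"Invalid NWP model selected: {user_text}")
-- ===== SOURCE B (Python) =====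
-- MODEL_REGISTRY = {
--     "hrrr": {
--         "aliases": ["hrrr"],
--         "kwargs": {"model": "hrrr", "product": "sfc"},
--     },
--     "nam5k": {
--         "aliases": ["nam5k", "nam-conusnest", "namnest", "nam hi-res nest"],
--         "kwargs": {"model": "nam", "product": "conusnest.hiresf"},
--     },
--     "nam12k": {
--         "aliases": ["nam12k", "nam-12km", "nam"],
--         "kwargs": {"model": "nam", "product": "awip12"},
--     },
--     "nbm": {
--         "aliases": ["nbm"],
--         "kwargs": {"model": "nbm", "product": "co"},
--     },
--     "rap": {
--         "aliases": ["rap"],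
--         "kwargs": {"model": "rap", "product": "awp130pgrb"},
--     },
--     "arw": {
--         "aliases": ["arw", "ncar-arw"],
--         "kwargs": {"model": "hiresw", "product": "arw_5km", "domain": "conus", "member": 2},
--     },
--     "fv3": {
--         "aliases": ["fv3"],
--         "kwargs": {"model": "hiresw", "product": "fv3_5km", "domain": "conus", "member": 1},
--     },
--     "href": {
--         "aliases": ["href"],
--         "kwargs": {"model": "href", "product": "mean", "domain": "conus"},
--     },
--     "gfs": {
--         "aliases": ["gfs"],
--         "kwargs": {"model": "gfs", "product": "pgrb2.0p25"},
--     },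
--     "rtma": {
--         "aliases": ["rtma"],
--         "kwargs": {"model": "rtma", "product": "anl"},
--     },
-- }
--
-- # Inverted index built once at module load: direct registry keys first (direct-hit
-- # precedence), then aliases with setdefault (first-match-wins).
-- ALIAS_TO_KEY = {}
-- for _reg_key in MODEL_REGISTRY:
--     ALIAS_TO_KEY[_reg_key] = _reg_key
-- for _reg_key, _entry in MODEL_REGISTRY.items():
--     for _alias in _entry.get("aliases", []):
--         ALIAS_TO_KEY.setdefault(_alias, _reg_key)
--
--
-- def normalize_model_key(user_text: str) -> str:
--     """Map user input to our registry key."""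
--     key = user_text.strip().lower()
--     try:
--         return ALIAS_TO_KEY[key]
--     except KeyError:
--         raise ValueError(f"Invalid NWP model selected: {user_text}")
-- ===== Notes on version B (the rewrite author's own statement) =====
-- stated objective: simpler
-- what changed: Replaces the direct-hit check plus per-call scan over all registry entries' alias lists with a module-level inverted ALIAS_TO_KEY table (direct keys inserted first, aliases via setdefault for first-match-wins), so the function body is a single dict lookup.
import Mathlib
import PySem

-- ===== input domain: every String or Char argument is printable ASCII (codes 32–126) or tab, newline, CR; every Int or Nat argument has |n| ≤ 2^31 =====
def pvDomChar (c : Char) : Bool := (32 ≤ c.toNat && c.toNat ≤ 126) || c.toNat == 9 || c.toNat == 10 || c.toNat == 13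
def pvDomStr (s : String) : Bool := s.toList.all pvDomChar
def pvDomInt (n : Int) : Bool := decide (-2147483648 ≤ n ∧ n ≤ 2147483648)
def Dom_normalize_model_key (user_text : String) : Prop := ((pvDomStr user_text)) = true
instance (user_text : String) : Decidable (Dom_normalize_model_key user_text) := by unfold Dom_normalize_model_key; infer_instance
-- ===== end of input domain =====

-- B replaces A's per-call direct-hit check + scan over every entry's alias list by a
-- precomputed inverted alias→key table, so the function is a single lookup (objective: simpler).

-- ===== PORT A =====
-- MODEL_REGISTRY as (reg_key, aliases) in insertion order (kwargs are unused by the function)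
def pvRegistry : List (String × List String) :=
  [("hrrr", ["hrrr"]),
   ("nam5k", ["nam5k", "nam-conusnest", "namnest", "nam hi-res nest"]),
   ("nam12k", ["nam12k", "nam-12km", "nam"]),
   ("nbm", ["nbm"]),
   ("rap", ["rap"]),
   ("arw", ["arw", "ncar-arw"]),
   ("fv3", ["fv3"]),
   ("href", ["href"]),
   ("gfs", ["gfs"]),
   ("rtma", ["rtma"])]

-- the 'for reg_key, entry in MODEL_REGISTRY.items(): if key in aliases: return reg_key' loop;
-- "" stands for the ValueError case, which Pre_ excludes
def pvAliasScan (key : String) : List (String × List String) → String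
  | [] => ""
  | (rk, al) :: rest => if al.contains key then rk else pvAliasScan key rest

def normalize_model_key (user_text : String) : String :=
  let key := PySem.Str.lower (PySem.Str.strip user_text)
  if (pvRegistry.map Prod.fst).contains key then key
  else pvAliasScan key pvRegistry

-- ===== PORT B =====
-- ALIAS_TO_KEY built once: reg_key -> reg_key first, then alias -> reg_key via setdefault
def pvAliasToKey : PySem.Dict String String :=
  let d := pvRegistry.foldl (fun d p => d.insert p.1 p.1) PySem.Dict.empty
  pvRegistry.foldl
    (fun d p => p.2.foldl (fun d a => if d.contains a then d else d.insert a p.1) d) d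

def normalize_model_key_alt (user_text : String) : String :=
  let key := PySem.Str.lower (PySem.Str.strip user_text)
  match pvAliasToKey.get? key with
  | some v => v
  | none => ""   -- ValueError case, excluded by Pre_

-- ===== PRECONDITION & SPEC =====
-- Pre_ excludes exactly the inputs on which A raises ValueError: the stripped,
-- lowercased text must be a registry key or alias.
def Pre_normalize_model_key (user_text : String) : Prop :=
  PySem.Str.lower (PySem.Str.strip user_text) ∈
    ["hrrr", "nam5k", "nam-conusnest", "namnest", "nam hi-res nest",
     "nam12k", "nam-12km", "nam", "nbm", "rap", "arw", "ncar-arw",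
     "fv3", "href", "gfs", "rtma"]
instance (user_text : String) : Decidable (Pre_normalize_model_key user_text) := by
  unfold Pre_normalize_model_key; infer_instance
def pvWitness_normalize_model_key : String := " NAM Hi-Res Nest "

def Spec_normalize_model_key (user_text : String) (out : String) : Prop := out = normalize_model_key_alt user_text
instance (user_text : String) (out : String) : Decidable (Spec_normalize_model_key user_text out) := by unfold Spec_normalize_model_key; infer_instance

-- ===== CLAIM (what is proved, stated in full; the proofs are below) =====
def Claim_equal_normalize_model_key : Prop := ∀ (user_text : String), Dom_normalize_model_key user_text → Pre_normalize_model_key user_text → Spec_normalize_model_key user_text (normalize_model_key user_text)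

-- ===== LEMMAS AND PROOFS =====

-- ===== VERDICT (by name: the statement is the Claim_ definition above) =====
theorem normalize_model_key_spec : Claim_equal_normalize_model_key := by
  intro s _ hp
  unfold Pre_normalize_model_key at hp
  unfold Spec_normalize_model_key normalize_model_key normalize_model_key_alt
  generalize PySem.Str.lower (PySem.Str.strip s) = k at hp
  fin_cases hp <;> decide
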